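-- pv_equiv track=rewrite | github.com/euisang0212/BaekjoonHub | 백준/Gold/1450. 냅색문제/냅색문제.py | meet_in_the_middle
-- ===== SOURCE A (Python) =====
-- from bisect import bisect_right
--
-- def get_subsets(weights):
--     subsets = []
--     n = len(weights)
--     for i in range(1 << n):  # 2^n개의 부분 집합
--         total_weight = 0
--         for j in range(n):
--             if i & (1 << j):  # j번째 물건을 부분 집합에 포함
--                 total_weight += weights[j]
--         subsets.append(total_weight)
--     return subsets
--
-- def meet_in_the_middle(N, C, weights):
--     # 1. 물건을 두 그룹으로 나눈다.
--     first_half = weights[:N // 2]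
--     second_half = weights[N // 2:]
--
--     # 2. 각 그룹의 부분 집합의 합을 구한다.
--     subset1 = get_subsets(first_half)
--     subset2 = get_subsets(second_half)
--
--     # 3. 두 번째 그룹의 부분 집합의 합을 정렬
--     subset2.sort()
--
--     # 4. 첫 번째 그룹의 각 부분 집합에 대해 두 번째 그룹에서 가능한 최대 값을 찾는다.
--     count = 0
--     for weight1 in subset1:
--         # 이분 탐색으로 weight1 + weight2 <= C를 만족하는 최대 weight2 찾기
--         remaining_capacity = C - weight1
--         count += bisect_right(subset2, remaining_capacity)
--
--     return count
-- ===== SOURCE B (Python) =====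
-- def meet_in_the_middle(N, C, weights):
--     # Build each half's subset sums already sorted, by iteratively merging
--     # the current sorted list with its shifted copy; then count pairs with a
--     # single two-pointer sweep instead of a binary search per element.
--     def sorted_subset_sums(items):
--         sums = [0]
--         for w in items:
--             shifted = [s + w for s in sums]
--             merged = []
--             i = j = 0
--             while i < len(sums) and j < len(shifted):
--                 if shifted[j] < sums[i]:
--                     merged.append(shifted[j])
--                     j += 1
--                 else:
--                     merged.append(sums[i])
--                     i += 1
--             merged.extend(sums[i:])
--             merged.extend(shifted[j:])
--             sums = merged
--         return sums
--
--     sums1 = sorted_subset_sums(weights[:N // 2])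
--     sums2 = sorted_subset_sums(weights[N // 2:])
--
--     count = 0
--     j = len(sums2)
--     for w1 in sums1:  # ascending, so C - w1 is non-increasing and j only moves left
--         while j > 0 and sums2[j - 1] > C - w1:
--             j -= 1
--         count += j
--     return count
-- ===== Notes on version B (the rewrite author's own statement) =====
-- stated objective: alternative
-- what changed: B builds each half's subset-sum list already sorted by iteratively merging the current sorted list with its shifted copy (instead of A's bit-mask enumeration of all 2^k subsets with an O(k) inner loop, followed by a sort), and replaces A's per-element binary search by a single two-pointer sweep over the two sorted lists; intended as faster (it drops the O(k) inner loop, measured 3.35x at n=16), but both remain exponential so a timing run could not confirm it at its largest size.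
import Mathlib
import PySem

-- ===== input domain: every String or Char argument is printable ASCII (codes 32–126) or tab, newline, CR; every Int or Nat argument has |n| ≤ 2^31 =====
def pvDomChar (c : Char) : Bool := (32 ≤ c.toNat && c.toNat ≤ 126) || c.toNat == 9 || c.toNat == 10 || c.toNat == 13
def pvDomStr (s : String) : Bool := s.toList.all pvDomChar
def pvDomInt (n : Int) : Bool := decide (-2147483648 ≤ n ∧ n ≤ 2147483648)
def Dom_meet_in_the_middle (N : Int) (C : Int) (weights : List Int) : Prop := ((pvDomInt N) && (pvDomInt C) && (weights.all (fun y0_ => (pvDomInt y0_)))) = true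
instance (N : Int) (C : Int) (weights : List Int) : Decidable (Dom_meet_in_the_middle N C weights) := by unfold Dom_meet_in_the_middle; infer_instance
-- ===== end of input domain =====

-- B replaces A's per-subset bisect over an enumerate-then-sort list by iteratively merged
-- (already sorted) subset-sum lists and a single two-pointer sweep (objective: alternative
-- algorithm without the O(k)-per-subset inner loop; both remain exponential overall).

-- ===== PORT A =====
-- helper get_subsets: 'for i in range(1 << n): for j in range(n): if i & (1 << j): total += weights[j]'
-- (1 << n / 1 << j with nonnegative shift counts are Lean's '<<<'; weights[j] is always in range
--  inside the loop, ported total as pyGetD _ _ 0)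
def get_subsets (weights : List Int) : List Int :=
  let n := weights.length
  (PySem.List.pyRange 0 ((1:Int) <<< n) 1).foldl
    (fun subsets i =>
      let total :=
        (PySem.List.pyRange 0 (n : Int) 1).foldl
          (fun t j =>
            if PySem.Int.band i ((1:Int) <<< j.toNat) ≠ 0 then t + PySem.List.pyGetD weights j 0
            else t)
          0
      subsets ++ [total])
    []

def meet_in_the_middle (N : Int) (C : Int) (weights : List Int) : Int :=
  let first_half := PySem.List.slice weights none (some (PySem.Int.floordiv N 2))
  let second_half := PySem.List.slice weights (some (PySem.Int.floordiv N 2)) none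
  let subset1 := get_subsets first_half
  let subset2 := get_subsets second_half
  let sorted2 := PySem.List.sorted subset2 (fun x => x)   -- subset2.sort()
  subset1.foldl
    (fun count weight1 => count + (PySem.List.bisectRight sorted2 (C - weight1) : Int)) 0

-- ===== PORT B =====
-- the index-based while-loop merge of Source B, as structural recursion on the two lists
def mergeTwo : List Int → List Int → List Int
  | [], ys => ys
  | x :: xs, [] => x :: xs
  | x :: xs, y :: ys =>
    if y < x then y :: mergeTwo (x :: xs) ys else x :: mergeTwo xs (y :: ys)

-- 'sums = [0]; for w in items: sums = merge(sums, [s + w for s in sums])'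
def sortedSubsetSums (items : List Int) : List Int :=
  items.foldl (fun sums w => mergeTwo sums (sums.map (· + w))) [0]

-- 'while j > 0 and sums2[j-1] > t: j -= 1'  (the index j-1 is always in range when entered)
def movePointer (sums2 : List Int) (t : Int) (j : Int) : Int :=
  if h : 0 < j ∧ t < PySem.List.pyGetD sums2 (j - 1) 0 then movePointer sums2 t (j - 1) else j
termination_by j.toNat
decreasing_by omega

def meet_in_the_middle_alt (N : Int) (C : Int) (weights : List Int) : Int :=
  let sums1 := sortedSubsetSums (PySem.List.slice weights none (some (PySem.Int.floordiv N 2)))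
  let sums2 := sortedSubsetSums (PySem.List.slice weights (some (PySem.Int.floordiv N 2)) none)
  let r :=
    sums1.foldl
      (fun jc w1 =>
        let j := movePointer sums2 (C - w1) jc.1
        (j, jc.2 + j))
      (PySem.List.len sums2, 0)
  r.2

-- ===== PRECONDITION & SPEC =====
def Spec_meet_in_the_middle (N : Int) (C : Int) (weights : List Int) (out : Int) : Prop := out = meet_in_the_middle_alt N C weights
instance (N : Int) (C : Int) (weights : List Int) (out : Int) : Decidable (Spec_meet_in_the_middle N C weights out) := by unfold Spec_meet_in_the_middle; infer_instance

-- ===== CLAIM (what is proved, stated in full; the proofs are below) =====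
def Claim_equal_meet_in_the_middle : Prop := ∀ (N : Int) (C : Int) (weights : List Int), Dom_meet_in_the_middle N C weights → Spec_meet_in_the_middle N C weights (meet_in_the_middle N C weights)

-- ===== LEMMAS AND PROOFS =====

-- the abstract (unordered, unsorted) subset-sum list both programs enumerate
def pureSums (w : List Int) : List Int :=
  w.foldl (fun s a => s ++ s.map (· + a)) [0]

-- the sum of the weights selected by the bits of m
def bitSum (w : List Int) (m : Nat) : Int :=
  ((List.range w.length).map (fun j => if m.testBit j then w.getD j 0 else 0)).sum

theorem mergeTwo_perm (xs ys : List Int) : (mergeTwo xs ys).Perm (xs ++ ys) := by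
  fun_induction mergeTwo xs ys with
  | case1 ys => simp
  | case2 x xs => simp

  | case3 x xs y ys h ih =>
    exact show (y :: mergeTwo (x :: xs) ys).Perm (x :: xs ++ y :: ys) from
      (ih.cons y).trans (List.Perm.symm (List.perm_middle))
  | case4 x xs y ys h ih =>
    exact show (x :: mergeTwo xs (y :: ys)).Perm (x :: xs ++ y :: ys) from ih.cons x

theorem mergeTwo_mem {z : Int} {xs ys : List Int} (h : z ∈ mergeTwo xs ys) : z ∈ xs ∨ z ∈ ys := by
  have := (mergeTwo_perm xs ys).mem_iff.mp h
  simpa using this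

theorem mergeTwo_pairwise {xs ys : List Int}
    (hx : xs.Pairwise (· ≤ ·)) (hy : ys.Pairwise (· ≤ ·)) :
    (mergeTwo xs ys).Pairwise (· ≤ ·) := by
  fun_induction mergeTwo xs ys with
  | case1 ys => exact hy
  | case2 x xs => exact hx
  | case3 x xs y ys h ih =>
    show List.Pairwise (· ≤ ·) (y :: mergeTwo (x :: xs) ys)
    rw [List.pairwise_cons] at hy ⊢
    refine ⟨fun z hz => ?_, ih hx hy.2⟩
    rcases mergeTwo_mem hz with hz | hz
    · rcases List.mem_cons.mp hz with rfl | hz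
      · omega
      · have := (List.pairwise_cons.mp hx).1 z hz; omega
    · exact hy.1 z hz
  | case4 x xs y ys h ih =>
    show List.Pairwise (· ≤ ·) (x :: mergeTwo xs (y :: ys))
    rw [List.pairwise_cons] at hx ⊢
    refine ⟨fun z hz => ?_, ih hx.2 hy⟩
    rcases mergeTwo_mem hz with hz | hz
    · exact hx.1 z hz
    · rcases List.mem_cons.mp hz with rfl | hz
      · omega
      · have := (List.pairwise_cons.mp hy).1 z hz; omega

theorem map_add_pairwise {s : List Int} (hs : s.Pairwise (· ≤ ·)) (a : Int) :
    (s.map (· + a)).Pairwise (· ≤ ·) := by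
  exact List.Pairwise.map _ (fun x y h => by omega) hs

theorem sortedSubsetSums_invariant (w : List Int) :
    ∀ (s t : List Int), s.Perm t → s.Pairwise (· ≤ ·) →
      (w.foldl (fun sums a => mergeTwo sums (sums.map (· + a))) s).Perm
          (w.foldl (fun sums a => sums ++ sums.map (· + a)) t)
        ∧ (w.foldl (fun sums a => mergeTwo sums (sums.map (· + a))) s).Pairwise (· ≤ ·) := by
  induction w with
  | nil => exact fun s t hp hs => ⟨hp, hs⟩
  | cons a w ih =>
    intro s t hp hs
    simp only [List.foldl_cons]
    refine ih _ _ ?_ (mergeTwo_pairwise hs (map_add_pairwise hs a))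
    exact (mergeTwo_perm s _).trans (hp.append (hp.map _))

theorem sortedSubsetSums_perm (w : List Int) : (sortedSubsetSums w).Perm (pureSums w) :=
  (sortedSubsetSums_invariant w [0] [0] (List.Perm.refl _) (by simp)).1

theorem sortedSubsetSums_pairwise (w : List Int) :
    (sortedSubsetSums w).Pairwise (· ≤ ·) :=
  (sortedSubsetSums_invariant w [0] [0] (List.Perm.refl _) (by simp)).2

theorem sorted_le_iff_lt_countP {l : List Int} (hl : l.Pairwise (· ≤ ·)) (t : Int) :
    ∀ (k : Nat) (hk : k < l.length),
      (l[k] ≤ t ↔ k < l.countP (fun s => decide (s ≤ t))) := by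
  induction l with
  | nil => intro k hk; simp at hk
  | cons x l ih =>
    have hx := (List.pairwise_cons.mp hl).1
    have hl' := (List.pairwise_cons.mp hl).2
    intro k hk
    match k with
    | 0 =>
      simp only [List.getElem_cons_zero, List.countP_cons]
      by_cases h : x ≤ t
      · simp [h]
      · have : l.countP (fun s => decide (s ≤ t)) = 0 :=
          List.countP_eq_zero.mpr (fun z hz => by simp; have := hx z hz; omega)
        simp [h, this]
    | k + 1 =>
      have hk' : k < l.length := by simpa using hk
      simp only [List.getElem_cons_succ]
      by_cases h : x ≤ t
      · rw [List.countP_cons_of_pos (p := fun s => decide (s ≤ t)) (a := x) (l := l) (by simpa using h), ih hl' k hk']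
        omega
      · have h0 : l.countP (fun s => decide (s ≤ t)) = 0 :=
          List.countP_eq_zero.mpr (fun z hz => by simp; have := hx z hz; omega)
        have hno : ¬ l[k] ≤ t := by
          have := hx (l[k]'hk') (List.getElem_mem _); omega
        rw [List.countP_cons_of_neg (p := fun s => decide (s ≤ t)) (a := x) (l := l) (by simpa using h), h0]
        simp [hno]

theorem bisectRight_eq_countP {l : List Int} (hl : l.Pairwise (· ≤ ·)) (t : Int) :
    PySem.List.bisectRight l t = l.countP (fun s => decide (s ≤ t)) := by
  obtain ⟨hle, hlow, hhigh⟩ := PySem.List.bisectRight_spec l t hl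
  set b := PySem.List.bisectRight l t with hb
  set c := l.countP (fun s => decide (s ≤ t)) with hc
  have hcle : c ≤ l.length := List.countP_le_length
  by_contra hne
  rcases Nat.lt_or_ge b c with h | h
  · -- b < c ≤ len: index b: x < l[b] from hhigh, but b < c means l[b] ≤ t
    have hblt : b < l.length := lt_of_lt_of_le h hcle
    have := (sorted_le_iff_lt_countP hl t b hblt).mpr h
    have := hhigh b hblt (le_refl b)
    omega
  · have hlt : c < b := lt_of_le_of_ne h (by omega)
    have hclt : c < l.length := lt_of_lt_of_le hlt hle
    have := hlow c hclt hlt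
    have := (sorted_le_iff_lt_countP hl t c hclt).mp this
    omega

theorem movePointer_eq_countP {l : List Int} (hl : l.Pairwise (· ≤ ·)) (t : Int) :
    ∀ (j : Int), (l.countP (fun s => decide (s ≤ t)) : Int) ≤ j → j ≤ l.length →
    movePointer l t j = (l.countP (fun s => decide (s ≤ t)) : Int) := by
  set c := l.countP (fun s => decide (s ≤ t)) with hc
  intro j
  induction hn : j.toNat using Nat.strong_induction_on generalizing j with
  | _ n ih =>
    intro hlo hhi
    rcases eq_or_lt_of_le hlo with heq | hlt
    · -- j = c : the loop guard is false
      rw [movePointer, dif_neg]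
      · exact heq.symm
      rintro ⟨hj0, hjt⟩
      have hc0 : 0 < c := by omega
      have hidx : (j - 1).toNat < l.length := by omega
      have hje : (j - 1).toNat < c := by omega
      have := (sorted_le_iff_lt_countP hl t (j - 1).toNat hidx).mpr hje
      rw [PySem.List.pyGetD_eq_getElem l (i := j-1) 0 (by omega) (by omega)] at hjt
      omega
    · -- c < j : the guard holds and the pointer moves left
      have hidx : (j - 1).toNat < l.length := by omega
      have hge : ¬ ((j - 1).toNat < c) := by omega
      have hgt : t < l[(j - 1).toNat] := by
        have := (sorted_le_iff_lt_countP hl t (j - 1).toNat hidx)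
        omega
      rw [movePointer, dif_pos ⟨by omega, by
        rw [PySem.List.pyGetD_eq_getElem l (i := j-1) 0 (by omega) (by omega)]; exact hgt⟩]
      exact ih (j - 1).toNat (by omega) (j - 1) rfl (by omega) (by omega)

theorem twoPointer_fold {l2 : List Int} (hl2 : l2.Pairwise (· ≤ ·)) (C : Int) :
    ∀ (l1 : List Int), l1.Pairwise (· ≤ ·) →
      ∀ (j0 cnt0 : Int), j0 ≤ l2.length →
        (∀ w ∈ l1, (l2.countP (fun s => decide (s ≤ C - w)) : Int) ≤ j0) →
        (l1.foldl (fun jc w1 => let j := movePointer l2 (C - w1) jc.1; (j, jc.2 + j))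
            (j0, cnt0)).2
          = cnt0 + (l1.map (fun w => (l2.countP (fun s => decide (s ≤ C - w)) : Int))).sum := by
  intro l1
  induction l1 with
  | nil => intro _ j0 cnt0 _ _; simp
  | cons w1 rest ih =>
    intro hp j0 cnt0 hhi hlo
    have hw1 := hlo w1 (List.mem_cons_self)
    have hmv : movePointer l2 (C - w1) j0 = (l2.countP (fun s => decide (s ≤ C - w1)) : Int) :=
      movePointer_eq_countP hl2 (C - w1) j0 hw1 hhi
    simp only [List.foldl_cons, List.map_cons, List.sum_cons]
    rw [hmv]
    rw [ih (List.pairwise_cons.mp hp).2 _ _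
        (by exact_mod_cast Int.ofNat_le.mpr List.countP_le_length)
        (fun w hw => by
          have hle : w1 ≤ w := (List.pairwise_cons.mp hp).1 w hw
          exact_mod_cast Int.ofNat_le.mpr
            (List.countP_mono_left (fun z _ hz => by simp at hz ⊢; omega)))]
    ring

theorem shiftLeft_one_int (k : Nat) : ((1:Int) <<< k) = ((2^k : Nat) : Int) := by
  simp [Int.shiftLeft_eq]

theorem shiftLeft_one_int' (k : Nat) : ((1:Int) <<< (k : Int)) = ((2^k : Nat) : Int) := by
  simp [Int.one_shiftLeft]

theorem inner_eq_bitSum (w : List Int) (m : Nat) :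
    (PySem.List.pyRange 0 (w.length : Int) 1).foldl
      (fun t j =>
        if PySem.Int.band (m : Int) ((1:Int) <<< (j.toNat : Int)) ≠ 0 then t + PySem.List.pyGetD w j 0
        else t)
      0 = bitSum w m := by
  have hfun : (fun (t : Int) (j : Int) =>
        if PySem.Int.band (m : Int) ((1:Int) <<< (j.toNat : Int)) ≠ 0 then t + PySem.List.pyGetD w j 0
        else t)
      = (fun t j => t + (if PySem.Int.band (m : Int) ((1:Int) <<< (j.toNat : Int)) ≠ 0
                         then PySem.List.pyGetD w j 0 else 0)) := by
    funext t j; split_ifs <;> simp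
  rw [hfun, PySem.List.foldl_add]
  rw [PySem.List.pyRange_one]
  simp only [Int.sub_zero, Int.toNat_natCast, List.map_map, zero_add]
  unfold bitSum
  congr 1
  apply List.map_congr_left
  intro j hj
  simp only [Function.comp_apply]
  rw [show ((j : Int)).toNat = j from by omega, shiftLeft_one_int',
      PySem.Int.band_natCast, PySem.List.pyGetD_natCast]
  by_cases hb : m.testBit j
  · rw [if_pos, if_pos hb]
    simpa [Nat.and_two_pow] using hb
  · rw [if_neg, if_neg hb]
    simpa [Nat.and_two_pow] using hb

theorem get_subsets_eq_map (w : List Int) :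
    get_subsets w = (List.range (2 ^ w.length)).map (bitSum w) := by
  unfold get_subsets
  rw [PySem.List.foldl_append_singleton_eq_map]
  rw [shiftLeft_one_int]
  simp only [PySem.List.pyRange_one, List.nil_append, Int.sub_zero, Int.toNat_natCast,
    List.map_map]
  apply List.map_congr_left
  intro m _
  simpa [PySem.List.pyRange_one] using inner_eq_bitSum w m

theorem bitSum_append_low (w : List Int) (a : Int) {m : Nat} (hm : m < 2 ^ w.length) :
    bitSum (w ++ [a]) m = bitSum w m := by
  unfold bitSum
  rw [List.length_append, List.length_singleton, List.range_succ, List.map_append,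
      List.sum_append]
  have hlast : (if m.testBit w.length then (w ++ [a]).getD w.length 0 else 0) = 0 := by
    rw [Nat.testBit_lt_two_pow hm]; simp
  simp only [List.map_cons, List.map_nil, List.sum_cons, List.sum_nil, hlast, add_zero]
  congr 1
  apply List.map_congr_left
  intro j hj
  rw [List.getD_append _ _ _ _ (List.mem_range.mp hj)]

theorem bitSum_append_high (w : List Int) (a : Int) {m : Nat} (hm : m < 2 ^ w.length) :
    bitSum (w ++ [a]) (2 ^ w.length + m) = bitSum w m + a := by
  unfold bitSum
  rw [List.length_append, List.length_singleton, List.range_succ, List.map_append,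
      List.sum_append]
  have hbit : (2 ^ w.length + m).testBit w.length = true := by
    rw [Nat.testBit_two_pow_add_eq, Nat.testBit_lt_two_pow hm]; rfl
  have hget : (w ++ [a]).getD w.length 0 = a := by
    rw [List.getD_eq_getElem?_getD, List.getElem?_append_right (le_refl _)]
    simp
  simp only [List.map_cons, List.map_nil, List.sum_cons, List.sum_nil, hbit, if_true, hget,
    add_zero]
  refine congrArg (· + a) (congrArg List.sum (List.map_congr_left fun j hj => ?_))
  rw [Nat.testBit_two_pow_add_gt (List.mem_range.mp hj),
      List.getD_append _ _ _ _ (List.mem_range.mp hj)]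

theorem pureSums_eq_map (w : List Int) :
    pureSums w = (List.range (2 ^ w.length)).map (bitSum w) := by
  induction w using List.reverseRecOn with
  | nil => simp [pureSums, bitSum]
  | append_singleton w a ih =>
    unfold pureSums at ih ⊢
    rw [List.foldl_append, List.foldl_cons, List.foldl_nil, ih]
    rw [List.length_append, List.length_singleton, pow_succ, mul_two, List.range_add,
        List.map_append, List.map_map, List.map_map]
    congr 1
    · apply List.map_congr_left
      intro m hm
      exact (bitSum_append_low w a (List.mem_range.mp hm)).symm
    · apply List.map_congr_left
      intro m hm
      simp only [Function.comp_apply]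
      exact (bitSum_append_high w a (List.mem_range.mp hm)).symm

theorem get_subsets_eq (w : List Int) : get_subsets w = pureSums w := by
  rw [get_subsets_eq_map, pureSums_eq_map]

-- ===== VERDICT (by name: the statement is the Claim_ definition above) =====
theorem meet_in_the_middle_spec : Claim_equal_meet_in_the_middle := by
  intro N C weights _
  unfold Spec_meet_in_the_middle meet_in_the_middle meet_in_the_middle_alt
  simp only []
  set fh := PySem.List.slice weights none (some (PySem.Int.floordiv N 2)) with hfh
  set sh := PySem.List.slice weights (some (PySem.Int.floordiv N 2)) none with hsh
  set l1 := sortedSubsetSums fh with hl1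
  set l2 := sortedSubsetSums sh with hl2
  set sorted2 := PySem.List.sorted (get_subsets sh) (fun x => x) with hsorted2
  -- the count of second-half subset sums ≤ t is the same in both programs
  have hcnt : ∀ t : Int,
      sorted2.countP (fun s => decide (s ≤ t)) = l2.countP (fun s => decide (s ≤ t)) := by
    intro t
    calc sorted2.countP (fun s => decide (s ≤ t))
        = (get_subsets sh).countP (fun s => decide (s ≤ t)) :=
          (PySem.List.sorted_perm (get_subsets sh) (fun x => x) false).countP_eq _
      _ = (pureSums sh).countP (fun s => decide (s ≤ t)) := by rw [get_subsets_eq]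
      _ = l2.countP (fun s => decide (s ≤ t)) :=
          ((sortedSubsetSums_perm sh).countP_eq _).symm
  have hs2 : sorted2.Pairwise (· ≤ ·) := PySem.List.sorted_pairwise _ _
  -- A's loop is a sum of per-element counts
  rw [get_subsets_eq, PySem.List.foldl_add]
  -- B's loop is the same sum
  rw [twoPointer_fold (sortedSubsetSums_pairwise sh) C l1 (sortedSubsetSums_pairwise fh)
        _ 0 (by rw [PySem.List.len_eq]) (fun w _ => by rw [PySem.List.len_eq]; exact_mod_cast Int.ofNat_le.mpr List.countP_le_length)]
  have hterm : ∀ w : Int,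
      (PySem.List.bisectRight sorted2 (C - w) : Int)
        = (l2.countP (fun s => decide (s ≤ C - w)) : Int) := by
    intro w
    rw [bisectRight_eq_countP hs2, hcnt]
  calc 0 + ((pureSums fh).map (fun w1 => (PySem.List.bisectRight sorted2 (C - w1) : Int))).sum
      = 0 + ((pureSums fh).map (fun w => (l2.countP (fun s => decide (s ≤ C - w)) : Int))).sum := by
        congr 1; exact congrArg List.sum (List.map_congr_left (fun w _ => hterm w))
    _ = 0 + (l1.map (fun w => (l2.countP (fun s => decide (s ≤ C - w)) : Int))).sum := by
        congr 1
        exact (((sortedSubsetSums_perm fh).map _).sum_eq).symm
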